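-- pv_equiv track=rewrite | github.com/Bootcamp-IA-P4/project-ix-data-engineering-team-2 | src/etl/tools/analyze_incompletes.py | build_match_graph
-- ===== SOURCE A (Python) =====
-- IDENT_KEYS = ['passport', 'email', 'fullname', 'telfnumber', 'name', 'last_name', 'address']
--
-- def match_any(record1, record2):
--     """Devuelve True si hay algún campo clave igual entre dos registros."""
--     for key in IDENT_KEYS:
--         if key in record1 and key in record2 and record1[key] and record2[key]:
--             if record1[key] == record2[key]:
--                 return True
--     return False
--
-- def build_match_graph(records):
--     """Construye un grafo de matches entre registros incompletos."""
--     n = len(records)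
--     graph = {i: set() for i in range(n)}
--     for i in range(n):
--         for j in range(i+1, n):
--             if match_any(records[i], records[j]):
--                 graph[i].add(j)
--                 graph[j].add(i)
--     return graph
-- ===== SOURCE B (Python) =====
-- IDENT_KEYS = ['passport', 'email', 'fullname', 'telfnumber', 'name', 'last_name', 'address']
--
-- def build_match_graph(records):
--     """Construye un grafo de matches entre registros incompletos."""
--     index = {}
--     for i, rec in enumerate(records):
--         for key in IDENT_KEYS:
--             v = rec.get(key)
--             if v:
--                 index.setdefault((key, v), []).append(i)
--     graph = {}
--     for i, rec in enumerate(records):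
--         nbrs = set()
--         for key in IDENT_KEYS:
--             v = rec.get(key)
--             if v:
--                 nbrs.update(index[(key, v)])
--         nbrs.discard(i)
--         graph[i] = nbrs
--     return graph
-- ===== Notes on version B (the rewrite author's own statement) =====
-- stated objective: faster
-- what changed: A compares every pair of records (O(n^2*k) match_any calls); B builds a (key,value)->record-indices index in one pass and unions, per record, the index groups of its own field values, so records are only connected through actually shared values.
import Mathlib
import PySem

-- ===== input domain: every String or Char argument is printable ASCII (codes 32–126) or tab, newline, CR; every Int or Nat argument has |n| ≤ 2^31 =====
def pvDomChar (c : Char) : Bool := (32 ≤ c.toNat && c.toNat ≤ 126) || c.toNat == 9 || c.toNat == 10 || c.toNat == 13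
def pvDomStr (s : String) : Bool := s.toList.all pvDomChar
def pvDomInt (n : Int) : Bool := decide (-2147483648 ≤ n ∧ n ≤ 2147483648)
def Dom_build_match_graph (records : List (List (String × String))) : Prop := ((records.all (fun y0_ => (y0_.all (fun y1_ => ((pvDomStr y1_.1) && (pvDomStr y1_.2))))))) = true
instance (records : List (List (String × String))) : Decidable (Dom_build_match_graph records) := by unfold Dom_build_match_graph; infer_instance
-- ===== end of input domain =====

-- B replaces A's all-pairs O(n²·k) scan by a (key,value) index: each record only meets the
-- records it actually shares a field value with (objective: faster; the returned sets are
-- Python sets, so their Lean representative is the ascending neighbour list on both sides).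

-- ===== PORT A =====
def pvIdentKeys : List String := ["passport", "email", "fullname", "telfnumber", "name", "last_name", "address"]

-- first-match lookup in a record's association list (exact for a Python dict argument)
def pvGet (r : List (String × String)) (k : String) : Option String :=
  (r.find? (fun p => p.1 == k)).map (·.2)

def match_any (r1 r2 : List (String × String)) : Bool :=
  pvIdentKeys.any (fun key =>
    match pvGet r1 key, pvGet r2 key with
    | some v1, some v2 => v1 != "" && v2 != "" && v1 == v2
    | _, _ => false)

def build_match_graph (records : List (List (String × String))) : List (Int × List Int) :=
  let n : Int := records.length
  let graph0 : PySem.Dict Int (PySem.Set Int) :=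
    (PySem.List.pyRange 0 n).foldl (fun g i => g.insert i PySem.Set.empty) PySem.Dict.empty
  let graph :=
    (PySem.List.pyRange 0 n).foldl (fun g i =>
      (PySem.List.pyRange (i+1) n).foldl (fun g j =>
        if match_any (PySem.List.pyGetD records i []) (PySem.List.pyGetD records j []) then
          (g.modify i PySem.Set.empty (fun s => s.add j)).modify j PySem.Set.empty (fun s => s.add i)
        else g) g) graph0
  graph.items

-- ===== PORT B =====
-- index: (key, value) ↦ ascending list of the records carrying that value
def pvIndex (records : List (List (String × String))) : PySem.Dict (String × String) (List Int) :=
  (PySem.List.enumerate records).foldl (fun d p =>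
    pvIdentKeys.foldl (fun d key =>
      match pvGet p.2 key with
      | some v => if v != "" then d.modify (key, v) [] (fun g => g ++ [p.1]) else d
      | none => d) d) PySem.Dict.empty

def build_match_graph_alt (records : List (List (String × String))) : List (Int × List Int) :=
  let index := pvIndex records
  (PySem.List.enumerate records).foldl (fun acc p =>
    let nbrs : PySem.Set Int :=
      pvIdentKeys.foldl (fun s key =>
        match pvGet p.2 key with
        | some v => if v != "" then s.update (index.getD (key, v) []) else s
        | none => s) PySem.Set.empty
    -- the value is a Python set (no order); we store its ascending representative
    acc ++ [(p.1, PySem.List.sorted (nbrs.discard p.1) (fun x => x))]) []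

-- ===== PRECONDITION & SPEC =====
def Spec_build_match_graph (records : List (List (String × String))) (out : List (Int × List Int)) : Prop := out = build_match_graph_alt records
instance (records : List (List (String × String))) (out : List (Int × List Int)) : Decidable (Spec_build_match_graph records out) := by unfold Spec_build_match_graph; infer_instance

-- ===== CLAIM (what is proved, stated in full; the proofs are below) =====
def Claim_equal_build_match_graph : Prop := ∀ (records : List (List (String × String))), Dom_build_match_graph records → Spec_build_match_graph records (build_match_graph records)

-- ===== LEMMAS AND PROOFS =====

-- the common normal form: node i ↦ ascending list of matching partners
def pvAdj (records : List (List (String × String))) (i : Int) : List Int :=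
  (PySem.List.pyRange 0 records.length).filter
    (fun j => j != i && match_any (PySem.List.pyGetD records i []) (PySem.List.pyGetD records j []))

def pvCanon (records : List (List (String × String))) : List (Int × List Int) :=
  (PySem.List.pyRange 0 records.length).map (fun i => (i, pvAdj records i))


-- match_any characterised: some identifying key carries the same non-empty value in both records
theorem pv_match_any_iff (r1 r2 : List (String × String)) :
    match_any r1 r2 = true ↔
      ∃ key ∈ pvIdentKeys, ∃ v, pvGet r1 key = some v ∧ pvGet r2 key = some v ∧ v ≠ "" := by
  simp only [match_any, List.any_eq_true]
  constructor
  · rintro ⟨key, hk, h⟩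
    cases h1 : pvGet r1 key with
    | none => rw [h1] at h; simp at h
    | some v1 =>
      cases h2 : pvGet r2 key with
      | none => rw [h1, h2] at h; simp at h
      | some v2 =>
        rw [h1, h2] at h
        simp only [Bool.and_eq_true, bne_iff_ne, ne_eq, beq_iff_eq] at h
        obtain ⟨⟨hv1, hv2⟩, heq⟩ := h
        exact ⟨key, hk, v1, h1, by rw [h2, heq], hv1⟩
  · rintro ⟨key, hk, v, h1, h2, hv⟩
    refine ⟨key, hk, ?_⟩
    rw [h1, h2]
    simp [hv]

theorem pv_match_any_comm (r1 r2 : List (String × String)) :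
    match_any r1 r2 = match_any r2 r1 := by
  rw [Bool.eq_iff_iff, pv_match_any_iff, pv_match_any_iff]
  constructor <;> rintro ⟨k, hk, v, h1, h2, hv⟩ <;> exact ⟨k, hk, v, h2, h1, hv⟩

-- ---------- A side: the pair loop ----------
def pvM (records : List (List (String × String))) (i j : Int) : Bool :=
  match_any (PySem.List.pyGetD records i []) (PySem.List.pyGetD records j [])

def pvStep (records : List (List (String × String))) (g : PySem.Dict Int (PySem.Set Int))
    (p : Int × Int) : PySem.Dict Int (PySem.Set Int) :=
  if pvM records p.1 p.2 then
    (g.modify p.1 PySem.Set.empty (fun s => s.add p.2)).modify p.2 PySem.Set.empty (fun s => s.add p.1)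
  else g

def pvPairs (n : Int) : List (Int × Int) :=
  (PySem.List.pyRange 0 n).flatMap (fun i => (PySem.List.pyRange (i+1) n).map (fun j => (i, j)))

def pvHit (records : List (List (String × String))) (i : Int) (p : Int × Int) : Bool :=
  (p.1 == i || p.2 == i) && pvM records p.1 p.2

def pvOther (i : Int) (p : Int × Int) : Int := if p.1 == i then p.2 else p.1

def pvContrib (records : List (List (String × String))) (P : List (Int × Int)) (i : Int) : List Int :=
  (P.filter (pvHit records i)).map (pvOther i)

theorem pv_mem_pvPairs (n : Int) (p : Int × Int) :
    p ∈ pvPairs n ↔ 0 ≤ p.1 ∧ p.1 < p.2 ∧ p.2 < n := by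
  unfold pvPairs
  simp only [List.mem_flatMap, List.mem_map, PySem.List.mem_pyRange_one]
  constructor
  · rintro ⟨a, ⟨ha0, han⟩, j, ⟨hj1, hj2⟩, rfl⟩
    exact ⟨ha0, by omega, hj2⟩
  · rintro ⟨h0, h12, h2n⟩
    exact ⟨p.1, ⟨h0, by omega⟩, p.2, ⟨by omega, h2n⟩, rfl⟩

theorem pv_getD_foldl_step (records : List (List (String × String))) :
    ∀ (P : List (Int × Int)) (g : PySem.Dict Int (PySem.Set Int)) (i : Int),
      (∀ p ∈ P, p.1 ≠ p.2) →
      (pvContrib records P i).Nodup →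
      (∀ x ∈ pvContrib records P i, x ∉ g.getD i PySem.Set.empty) →
      (P.foldl (pvStep records) g).getD i PySem.Set.empty
        = g.getD i PySem.Set.empty ++ pvContrib records P i := by
  intro P
  induction P with
  | nil => intro g i _ _ _; simp [pvContrib]
  | cons p T ih =>
    intro g i hne hnd hfresh
    have hpT : ∀ q ∈ T, q.1 ≠ q.2 := fun q hq => hne q (List.mem_cons_of_mem _ hq)
    have hp12 : p.1 ≠ p.2 := hne p List.mem_cons_self
    rw [List.foldl_cons]
    by_cases hm : pvM records p.1 p.2
    · by_cases hi1 : i = p.1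
      · subst hi1
        have hhit : pvHit records p.1 p = true := by simp [pvHit, hm]
        have hother : pvOther p.1 p = p.2 := by simp [pvOther]
        have hcontrib : pvContrib records (p :: T) p.1 = p.2 :: pvContrib records T p.1 := by
          simp [pvContrib, hhit, hother]
        rw [hcontrib] at hnd hfresh
        have hp2g : p.2 ∉ g.getD p.1 PySem.Set.empty := hfresh p.2 List.mem_cons_self
        have hg' : (pvStep records g p).getD p.1 PySem.Set.empty
            = g.getD p.1 PySem.Set.empty ++ [p.2] := by
          unfold pvStep
          rw [if_pos hm, PySem.Dict.getD_modify]
          rw [if_neg (show ¬ p.1 = p.2 from hp12)]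
          rw [PySem.Dict.getD_modify, if_pos rfl]
          exact PySem.Set.add_of_not_mem hp2g
        rw [ih _ p.1 hpT (List.Nodup.of_cons hnd) ?_, hg', hcontrib]
        · simp
        · intro x hx
          rw [hg']
          simp only [List.mem_append, List.mem_singleton]
          rintro (hc | hc)
          · exact hfresh x (List.mem_cons_of_mem _ hx) hc
          · exact (List.nodup_cons.mp hnd).1 (hc ▸ hx)
      · by_cases hi2 : i = p.2
        · subst hi2
          have hhit : pvHit records p.2 p = true := by simp [pvHit, hm]
          have hother : pvOther p.2 p = p.1 := by
            simp only [pvOther, beq_iff_eq]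
            rw [if_neg (fun h => hi1 h.symm)]
          have hcontrib : pvContrib records (p :: T) p.2 = p.1 :: pvContrib records T p.2 := by
            simp [pvContrib, hhit, hother]
          rw [hcontrib] at hnd hfresh
          have hp1g : p.1 ∉ g.getD p.2 PySem.Set.empty := hfresh p.1 List.mem_cons_self
          have hg' : (pvStep records g p).getD p.2 PySem.Set.empty
              = g.getD p.2 PySem.Set.empty ++ [p.1] := by
            unfold pvStep
            rw [if_pos hm, PySem.Dict.getD_modify, if_pos rfl, PySem.Dict.getD_modify]
            rw [if_neg hi1]
            exact PySem.Set.add_of_not_mem hp1g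
          rw [ih _ p.2 hpT (List.Nodup.of_cons hnd) ?_, hg', hcontrib]
          · simp
          · intro x hx
            rw [hg']
            simp only [List.mem_append, List.mem_singleton]
            rintro (hc | hc)
            · exact hfresh x (List.mem_cons_of_mem _ hx) hc
            · exact (List.nodup_cons.mp hnd).1 (hc ▸ hx)
        · have hhit : pvHit records i p = false := by
            simp only [pvHit, Bool.and_eq_false_iff, Bool.or_eq_false_iff, beq_eq_false_iff_ne, ne_eq]
            exact Or.inl ⟨by omega, by omega⟩
          have hcontrib : pvContrib records (p :: T) i = pvContrib records T i := by
            simp [pvContrib, hhit]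
          rw [hcontrib] at hnd hfresh
          have hg' : (pvStep records g p).getD i PySem.Set.empty = g.getD i PySem.Set.empty := by
            unfold pvStep
            rw [if_pos hm, PySem.Dict.getD_modify, if_neg hi2, PySem.Dict.getD_modify, if_neg hi1]
          rw [ih _ i hpT hnd (by rw [hg']; exact hfresh), hg', hcontrib]
    · have hhit : pvHit records i p = false := by
        simp [pvHit, hm]
      have hcontrib : pvContrib records (p :: T) i = pvContrib records T i := by
        simp [pvContrib, hhit]
      rw [hcontrib] at hnd hfresh
      have hg' : pvStep records g p = g := by simp [pvStep, hm]
      rw [hg', ih _ i hpT hnd hfresh, hcontrib]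

theorem pv_contains_pvStep (records : List (List (String × String)))
    (g : PySem.Dict Int (PySem.Set Int)) (p : Int × Int) (x : Int)
    (h : g.contains x = true) : (pvStep records g p).contains x = true := by
  unfold pvStep
  split
  · rw [PySem.Dict.contains_modify, PySem.Dict.contains_modify]
    simp [h]
  · exact h

theorem pv_keys_modify_of_contains (g : PySem.Dict Int (PySem.Set Int)) (k : Int)
    (d0 : PySem.Set Int) (f : PySem.Set Int → PySem.Set Int) (h : g.contains k = true) :
    (g.modify k d0 f).keys = g.keys := by
  rw [PySem.Dict.keys_modify]
  simp only [PySem.Dict.keys]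
  rw [PySem.Dict.items_insert_of_contains _ _ h, List.map_map]
  apply List.map_congr_left
  intro q _
  by_cases hqk : q.1 = k
  · simp [hqk]
  · simp [hqk]

theorem pv_keys_foldl_step (records : List (List (String × String))) :
    ∀ (P : List (Int × Int)) (g : PySem.Dict Int (PySem.Set Int)),
      (∀ p ∈ P, g.contains p.1 = true ∧ g.contains p.2 = true) →
      (P.foldl (pvStep records) g).keys = g.keys := by
  intro P
  induction P with
  | nil => intro g _; rfl
  | cons p T ih =>
    intro g h
    have hp := h p List.mem_cons_self
    have hkeys : (pvStep records g p).keys = g.keys := by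
      unfold pvStep
      split
      · rw [pv_keys_modify_of_contains _ _ _ _ (by rw [PySem.Dict.contains_modify]; simp [hp.2]),
           pv_keys_modify_of_contains _ _ _ _ hp.1]
      · rfl
    rw [List.foldl_cons,
        ih _ (fun q hq => ⟨pv_contains_pvStep _ _ _ _ (h q (List.mem_cons_of_mem _ hq)).1,
                          pv_contains_pvStep _ _ _ _ (h q (List.mem_cons_of_mem _ hq)).2⟩),
        hkeys]

theorem pv_g0_items (n : Int) :
    ((PySem.List.pyRange 0 n).foldl (fun g i => g.insert i PySem.Set.empty)
        (PySem.Dict.empty : PySem.Dict Int (PySem.Set Int))).items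
      = (PySem.List.pyRange 0 n).map (fun i => (i, PySem.Set.empty)) := by
  have h := PySem.Dict.items_foldl_insert_fresh (PySem.List.pyRange 0 n) (fun i => i)
      (fun _ => (PySem.Set.empty : PySem.Set Int)) PySem.Dict.empty
      (fun a _ => PySem.Dict.contains_empty a)
      (by simpa using PySem.List.nodup_pyRange_one 0 n)
  simpa using h

theorem pv_g0_getD (l : List Int) :
    ∀ (d : PySem.Dict Int (PySem.Set Int)),
      (∀ k, d.getD k PySem.Set.empty = PySem.Set.empty) →
      ∀ k, ((l.foldl (fun g i => g.insert i PySem.Set.empty) d).getD k PySem.Set.empty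
              = PySem.Set.empty) := by
  induction l with
  | nil => intro d h k; exact h k
  | cons a t ih =>
    intro d h k
    rw [List.foldl_cons]
    apply ih
    intro k'
    by_cases hk : k' = a
    · subst hk; rw [PySem.Dict.getD_insert_self]
    · rw [PySem.Dict.getD_insert_of_ne _ _ _ hk]; exact h k'

-- contrib of the full pair list is the ascending neighbour list
theorem pv_contrib_append (records : List (List (String × String))) (P Q : List (Int × Int)) (i : Int) :
    pvContrib records (P ++ Q) i = pvContrib records P i ++ pvContrib records Q i := by
  simp [pvContrib]

theorem pv_contrib_flatMap {α : Type} (records : List (List (String × String)))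
    (l : List α) (f : α → List (Int × Int)) (i : Int) :
    pvContrib records (l.flatMap f) i = l.flatMap (fun a => pvContrib records (f a) i) := by
  induction l with
  | nil => simp [pvContrib]
  | cons a t ih => simp only [List.flatMap_cons, pv_contrib_append, ih]

theorem pv_flatMap_if (l : List Int) (p : Int → Bool) :
    (l.flatMap (fun a => if p a then [a] else [])) = l.filter p := by
  induction l with
  | nil => rfl
  | cons a t ih =>
    simp only [List.flatMap_cons, List.filter_cons, ih]
    split <;> simp

theorem pv_flatMap_congr {α β : Type} (l : List α) (f g : α → List β)
    (h : ∀ a ∈ l, f a = g a) : l.flatMap f = l.flatMap g := by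
  induction l with
  | nil => rfl
  | cons a t ih =>
    simp only [List.flatMap_cons]
    rw [h a List.mem_cons_self, ih (fun a ha => h a (List.mem_cons_of_mem _ ha))]

theorem pv_piece_lt (records : List (List (String × String))) (n a i : Int)
    (ha : a < i) (hi : i < n) :
    pvContrib records ((PySem.List.pyRange (a+1) n).map (fun j => (a, j))) i
      = if pvM records i a then [a] else [] := by
  unfold pvContrib
  rw [List.filter_map, List.map_map]
  have hfe : ((PySem.List.pyRange (a+1) n).filter ((pvHit records i) ∘ (fun j => (a, j))))
      = ((PySem.List.pyRange (a+1) n).filter (fun j => pvM records a j)).filter (fun j => j == i) := by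
    rw [List.filter_filter]
    apply List.filter_congr
    intro j _
    simp only [Function.comp, pvHit]
    have : (a == i) = false := by simp only [beq_eq_false_iff_ne, ne_eq]; omega
    rw [this, Bool.false_or, Bool.and_comm]
  rw [hfe, List.filter_beq]
  by_cases hmi : pvM records a i
  · have hmem : i ∈ (PySem.List.pyRange (a+1) n).filter (fun j => pvM records a j) := by
      rw [List.mem_filter, PySem.List.mem_pyRange_one]
      exact ⟨⟨by omega, hi⟩, hmi⟩
    have hnd : ((PySem.List.pyRange (a+1) n).filter (fun j => pvM records a j)).Nodup :=
      (PySem.List.nodup_pyRange_one (a+1) n).filter _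
    rw [List.count_eq_one_of_mem hnd hmem]
    have : pvM records i a = true := by rw [pvM, pv_match_any_comm]; exact hmi
    rw [if_pos this, List.replicate_one]
    simp only [List.map_cons, List.map_nil, Function.comp, pvOther]
    rw [if_neg (by simp only [beq_iff_eq]; omega)]
  · have hcnt : List.count i ((PySem.List.pyRange (a+1) n).filter (fun j => pvM records a j)) = 0 := by
      rw [List.count_eq_zero]
      intro hmem
      rw [List.mem_filter] at hmem
      exact hmi hmem.2
    have : pvM records i a = false := by
      rw [pvM, pv_match_any_comm, ← pvM]
      simpa using hmi
    rw [hcnt, if_neg (by simp [this]), List.replicate_zero, List.map_nil]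

theorem pv_piece_eq (records : List (List (String × String))) (n i : Int) :
    pvContrib records ((PySem.List.pyRange (i+1) n).map (fun j => (i, j))) i
      = (PySem.List.pyRange (i+1) n).filter (fun j => pvM records i j) := by
  unfold pvContrib
  rw [List.filter_map, List.map_map]
  have hfe : (pvHit records i) ∘ (fun j => (i, j)) = fun j => pvM records i j := by
    funext j
    simp [pvHit]
  rw [hfe]
  have : ∀ j ∈ (PySem.List.pyRange (i+1) n).filter (fun j => pvM records i j),
      (pvOther i ∘ (fun j => (i, j))) j = id j := by
    intro j _
    simp [pvOther]
  rw [List.map_congr_left this, List.map_id]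

theorem pv_piece_gt (records : List (List (String × String))) (n a i : Int) (hia : i < a) :
    pvContrib records ((PySem.List.pyRange (a+1) n).map (fun j => (a, j))) i = [] := by
  unfold pvContrib
  rw [List.filter_map]
  have : ((PySem.List.pyRange (a+1) n).filter ((pvHit records i) ∘ (fun j => (a, j)))) = [] := by
    rw [List.filter_eq_nil_iff]
    intro j hj
    rw [PySem.List.mem_pyRange_one] at hj
    simp only [Function.comp, pvHit, Bool.and_eq_true, Bool.or_eq_true, beq_iff_eq]
    rintro ⟨h | h, -⟩ <;> omega
  rw [this]
  rfl

theorem pv_contrib_pairs (records : List (List (String × String))) (i : Int)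
    (h0 : 0 ≤ i) (hn : i < (records.length : Int)) :
    pvContrib records (pvPairs records.length) i = pvAdj records i := by
  have hsplit : PySem.List.pyRange 0 (records.length : Int)
      = (PySem.List.pyRange 0 i ++ [i]) ++ PySem.List.pyRange (i+1) (records.length : Int) := by
    rw [← PySem.List.pyRange_one_succ_right h0,
        ← PySem.List.pyRange_one_append 0 (i+1) (records.length : Int) (by omega) (by omega)]
  unfold pvPairs
  rw [hsplit, List.flatMap_append, List.flatMap_append, pv_contrib_append, pv_contrib_append,
      pv_contrib_flatMap, pv_contrib_flatMap, pv_contrib_flatMap]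
  have hb1 : (PySem.List.pyRange 0 i).flatMap
      (fun a => pvContrib records ((PySem.List.pyRange (a+1) (records.length : Int)).map (fun j => (a, j))) i)
      = (PySem.List.pyRange 0 i).filter (fun a => pvM records i a) := by
    rw [pv_flatMap_congr _ _ (fun a => if pvM records i a then [a] else []) ?_, pv_flatMap_if]
    intro a ha
    rw [PySem.List.mem_pyRange_one] at ha
    exact pv_piece_lt records _ a i (by omega) hn
  have hb2 : ([i] : List Int).flatMap
      (fun a => pvContrib records ((PySem.List.pyRange (a+1) (records.length : Int)).map (fun j => (a, j))) i)
      = (PySem.List.pyRange (i+1) (records.length : Int)).filter (fun j => pvM records i j) := by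
    simp only [List.flatMap_cons, List.flatMap_nil, List.append_nil]
    exact pv_piece_eq records _ i
  have hb3 : (PySem.List.pyRange (i+1) (records.length : Int)).flatMap
      (fun a => pvContrib records ((PySem.List.pyRange (a+1) (records.length : Int)).map (fun j => (a, j))) i)
      = [] := by
    rw [pv_flatMap_congr _ _ (fun _ => []) ?_]
    · simp
    · intro a ha
      rw [PySem.List.mem_pyRange_one] at ha
      exact pv_piece_gt records _ a i (by omega)
  rw [hb1, hb2, hb3, List.append_nil]
  unfold pvAdj
  rw [hsplit, List.filter_append, List.filter_append]
  have hmid : List.filter (fun j => j != i && match_any (PySem.List.pyGetD records i [])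
      (PySem.List.pyGetD records j [])) [i] = [] := by simp
  rw [hmid, List.append_nil]
  congr 1
  · apply List.filter_congr
    intro j hj
    rw [PySem.List.mem_pyRange_one] at hj
    have hb : (j != i) = true := by simp only [bne_iff_ne, ne_eq]; omega
    rw [hb, Bool.true_and]
    rfl
  · apply List.filter_congr
    intro j hj
    rw [PySem.List.mem_pyRange_one] at hj
    have hb : (j != i) = true := by simp only [bne_iff_ne, ne_eq]; omega
    rw [hb, Bool.true_and]
    rfl

theorem pvA_eq_canon (records : List (List (String × String))) :
    build_match_graph records = pvCanon records := by
  unfold build_match_graph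
  dsimp only
  have hloop : (PySem.List.pyRange 0 (records.length : Int)).foldl (fun g i =>
      (PySem.List.pyRange (i+1) (records.length : Int)).foldl (fun g j =>
        if match_any (PySem.List.pyGetD records i []) (PySem.List.pyGetD records j []) then
          (g.modify i PySem.Set.empty (fun s => s.add j)).modify j PySem.Set.empty (fun s => s.add i)
        else g) g)
      ((PySem.List.pyRange 0 (records.length : Int)).foldl (fun g i => g.insert i PySem.Set.empty) PySem.Dict.empty)
      = (pvPairs (records.length : Int)).foldl (pvStep records)
          ((PySem.List.pyRange 0 (records.length : Int)).foldl (fun g i => g.insert i PySem.Set.empty) PySem.Dict.empty) := by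
    rw [pvPairs, List.foldl_flatMap]
    apply List.foldl_ext
    intro g i _
    rw [List.foldl_map]
    rfl
  rw [hloop]
  set n : Int := (records.length : Int) with hn
  set g0 : PySem.Dict Int (PySem.Set Int) :=
    (PySem.List.pyRange 0 n).foldl (fun g i => g.insert i PySem.Set.empty) PySem.Dict.empty with hg0
  have hg0items : g0.items = (PySem.List.pyRange 0 n).map (fun i => (i, PySem.Set.empty)) :=
    pv_g0_items n
  have hg0keys : g0.keys = PySem.List.pyRange 0 n := by
    simp only [PySem.Dict.keys, hg0items, List.map_map]
    show List.map (fun i : Int => i) (PySem.List.pyRange 0 n) = PySem.List.pyRange 0 n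
    simp
  have hg0contains : ∀ x : Int, 0 ≤ x → x < n → g0.contains x = true := by
    intro x h0 h1
    rw [PySem.Dict.contains_iff_mem_keys, hg0keys, PySem.List.mem_pyRange_one]
    exact ⟨h0, h1⟩
  have hg0getD : ∀ k, g0.getD k PySem.Set.empty = PySem.Set.empty :=
    pv_g0_getD (PySem.List.pyRange 0 n) PySem.Dict.empty
      (fun k => PySem.Dict.getD_empty k PySem.Set.empty)
  have hkeysfinal : ((pvPairs n).foldl (pvStep records) g0).keys = PySem.List.pyRange 0 n := by
    rw [pv_keys_foldl_step records (pvPairs n) g0 ?_]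
    · exact hg0keys
    · intro p hp
      rw [pv_mem_pvPairs] at hp
      exact ⟨hg0contains p.1 hp.1 (by omega), hg0contains p.2 (by omega) hp.2.2⟩
  have hgetD : ∀ i, 0 ≤ i → i < n →
      ((pvPairs n).foldl (pvStep records) g0).getD i PySem.Set.empty = pvAdj records i := by
    intro i h0 hi
    have hcp : pvContrib records (pvPairs n) i = pvAdj records i := pv_contrib_pairs records i h0 hi
    have hnodadj : (pvAdj records i).Nodup := (PySem.List.nodup_pyRange_one 0 n).filter _
    rw [pv_getD_foldl_step records (pvPairs n) g0 i ?_ ?_ ?_, hg0getD, hcp]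
    · exact List.nil_append _
    · intro p hp
      rw [pv_mem_pvPairs] at hp
      omega
    · rw [hcp]; exact hnodadj
    · intro x _
      rw [hg0getD]
      exact List.not_mem_nil
  rw [PySem.Dict.items_eq_map_keys _ (by rw [hkeysfinal]; exact PySem.List.nodup_pyRange_one 0 n) PySem.Set.empty,
      hkeysfinal]
  unfold pvCanon
  apply List.map_congr_left
  intro i hi
  rw [PySem.List.mem_pyRange_one] at hi
  rw [hgetD i hi.1 hi.2]

-- ---------- B side: the index ----------
def pvEntries (records : List (List (String × String))) : List ((String × String) × Int) :=
  (PySem.List.enumerate records).flatMap (fun p =>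
    pvIdentKeys.filterMap (fun key =>
      match pvGet p.2 key with
      | some v => if v != "" then some ((key, v), p.1) else none
      | none => none))

theorem pvIndex_eq (records : List (List (String × String))) :
    pvIndex records
      = (pvEntries records).foldl (fun d q => d.modify q.1 [] (fun g => g ++ [q.2])) PySem.Dict.empty := by
  unfold pvIndex pvEntries
  rw [List.foldl_flatMap]
  apply List.foldl_ext
  intro d p _
  rw [List.foldl_filterMap]
  apply List.foldl_ext
  intro d' key _
  cases hv : pvGet p.2 key with
  | none => rfl
  | some v =>
    dsimp only
    split <;> rfl

theorem pv_index_getD (records : List (List (String × String))) (c : String × String) :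
    (pvIndex records).getD c []
      = ((pvEntries records).filter (fun q => q.1 == c)).map (fun q => q.2) := by
  rw [pvIndex_eq, PySem.Dict.getD_foldl_modify_append, PySem.Dict.getD_empty, List.nil_append]

theorem pv_mem_entries (records : List (List (String × String))) (key v : String) (j : Int) :
    ((key, v), j) ∈ pvEntries records ↔
      0 ≤ j ∧ j < (records.length : Int) ∧ key ∈ pvIdentKeys ∧
        pvGet (PySem.List.pyGetD records j []) key = some v ∧ v ≠ "" := by
  unfold pvEntries
  rw [PySem.List.enumerate_eq_map_pyRange records []]
  simp only [List.mem_flatMap, List.mem_map, List.mem_filterMap, PySem.List.mem_pyRange_one,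
    PySem.List.len_eq]
  constructor
  · rintro ⟨p, ⟨a, ⟨ha0, han⟩, rfl⟩, k', hk', hmk⟩
    cases hv : pvGet (PySem.List.pyGetD records a []) k' with
    | none => rw [hv] at hmk; simp at hmk
    | some w =>
      rw [hv] at hmk
      dsimp only at hmk
      by_cases hw : w != ""
      · rw [if_pos hw] at hmk
        have h1 : k' = key ∧ w = v ∧ a = j := by
          have := Option.some.inj hmk
          exact ⟨congrArg (fun q => q.1.1) this, congrArg (fun q => q.1.2) this,
                 congrArg (fun q => q.2) this⟩
        obtain ⟨rfl, rfl, rfl⟩ := h1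
        exact ⟨ha0, han, hk', hv, by simpa using hw⟩
      · rw [if_neg hw] at hmk
        simp at hmk
  · rintro ⟨h0, hn, hk, hg, hv⟩
    refine ⟨(j, PySem.List.pyGetD records j []), ⟨j, ⟨h0, hn⟩, rfl⟩, key, hk, ?_⟩
    rw [hg]
    dsimp only
    rw [if_pos (by simpa using hv)]

theorem pv_mem_index (records : List (List (String × String))) (key v : String) (x : Int) :
    x ∈ (pvIndex records).getD (key, v) [] ↔
      0 ≤ x ∧ x < (records.length : Int) ∧ key ∈ pvIdentKeys ∧
        pvGet (PySem.List.pyGetD records x []) key = some v ∧ v ≠ "" := by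
  rw [pv_index_getD]
  simp only [List.mem_map, List.mem_filter]
  constructor
  · rintro ⟨q, ⟨hq, hq1⟩, rfl⟩
    obtain ⟨⟨qk, qv⟩, qj⟩ := q
    have : (qk, qv) = (key, v) := by simpa using hq1
    rw [this] at hq
    exact (pv_mem_entries records key v qj).mp hq
  · intro h
    exact ⟨((key, v), x), ⟨(pv_mem_entries records key v x).mpr h, by simp⟩, rfl⟩

def pvCand (records : List (List (String × String))) (rec : List (String × String))
    (key : String) : List Int :=
  match pvGet rec key with
  | some v => if v != "" then (pvIndex records).getD (key, v) [] else []
  | none => []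

theorem pv_foldl_update {α : Type} (l : List α) (f : α → List Int) :
    ∀ s : PySem.Set Int, l.foldl (fun s a => PySem.Set.update s (f a)) s
      = PySem.Set.update s (l.flatMap f) := by
  induction l with
  | nil => intro s; rfl
  | cons a t ih =>
    intro s
    rw [List.foldl_cons, ih, List.flatMap_cons]
    simp [PySem.Set.update, List.foldl_append]

theorem pv_nbrs_eq (records : List (List (String × String))) (rec : List (String × String)) :
    pvIdentKeys.foldl (fun s key =>
        match pvGet rec key with
        | some v => if v != "" then PySem.Set.update s ((pvIndex records).getD (key, v) []) else s
        | none => s) PySem.Set.empty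
      = PySem.Set.ofList (pvIdentKeys.flatMap (pvCand records rec)) := by
  have h : pvIdentKeys.foldl (fun s key =>
        match pvGet rec key with
        | some v => if v != "" then PySem.Set.update s ((pvIndex records).getD (key, v) []) else s
        | none => s) PySem.Set.empty
      = pvIdentKeys.foldl (fun s key => PySem.Set.update s (pvCand records rec key)) PySem.Set.empty := by
    apply List.foldl_ext
    intro s key _
    unfold pvCand
    cases hv : pvGet rec key with
    | none => rfl
    | some v =>
      dsimp only
      split <;> rfl
  rw [h, pv_foldl_update, PySem.Set.ofList_eq_foldl]
  rfl

theorem pv_mem_cand (records : List (List (String × String))) (rec : List (String × String))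
    (key : String) (x : Int) :
    x ∈ pvCand records rec key ↔
      ∃ v, pvGet rec key = some v ∧ v ≠ "" ∧ x ∈ (pvIndex records).getD (key, v) [] := by
  unfold pvCand
  cases hv : pvGet rec key with
  | none => simp
  | some v =>
    dsimp only
    by_cases hw : v != ""
    · rw [if_pos hw]
      simp only [Option.some.injEq]
      constructor
      · intro hx
        exact ⟨v, rfl, by simpa using hw, hx⟩
      · rintro ⟨w, rfl, -, hx⟩
        exact hx
    · rw [if_neg hw]
      simp only [bne_iff_ne, ne_eq, not_not] at hw
      simp [hw]

theorem pvB_eq_canon (records : List (List (String × String))) :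
    build_match_graph_alt records = pvCanon records := by
  unfold build_match_graph_alt
  dsimp only
  rw [PySem.List.foldl_append_singleton_eq_map (fun p : Int × List (String × String) =>
        (p.1, PySem.List.sorted ((pvIdentKeys.foldl (fun s key =>
          match pvGet p.2 key with
          | some v => if v != "" then PySem.Set.update s ((pvIndex records).getD (key, v) []) else s
          | none => s) PySem.Set.empty).discard p.1) (fun x => x))),
     List.nil_append,
     PySem.List.enumerate_eq_map_pyRange records [], List.map_map]
  unfold pvCanon
  apply List.map_congr_left
  intro i hi
  rw [PySem.List.mem_pyRange_one] at hi
  dsimp only [Function.comp]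
  congr 1
  rw [pv_nbrs_eq]
  apply PySem.List.sorted_eq_of_perm_of_pairwise_lt
  · have hnd1 : (pvAdj records i).Nodup := by
      unfold pvAdj
      exact (PySem.List.nodup_pyRange_one 0 _).filter _
    have hnd2 : ((PySem.Set.ofList (List.flatMap (pvCand records (PySem.List.pyGetD records i []))
        pvIdentKeys)).discard i).Nodup :=
      PySem.Set.nodup_discard _ _ (PySem.Set.nodup_ofList _)
    rw [List.perm_ext_iff_of_nodup hnd1 hnd2]
    intro x
    rw [PySem.Set.mem_discard, PySem.Set.mem_ofList, List.mem_flatMap]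
    unfold pvAdj
    rw [List.mem_filter, PySem.List.mem_pyRange_one]
    constructor
    · rintro ⟨⟨hx0, hxn⟩, hb⟩
      rw [Bool.and_eq_true, bne_iff_ne] at hb
      obtain ⟨hne, hm⟩ := hb
      rw [pv_match_any_iff] at hm
      obtain ⟨key, hk, v, h1, h2, hv⟩ := hm
      refine ⟨⟨key, hk, ?_⟩, hne⟩
      rw [pv_mem_cand]
      exact ⟨v, h1, hv, (pv_mem_index records key v x).mpr ⟨hx0, by simpa using hxn, hk, h2, hv⟩⟩
    · rintro ⟨⟨key, hk, hc⟩, hne⟩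
      rw [pv_mem_cand] at hc
      obtain ⟨v, h1, hv, hidx⟩ := hc
      rw [pv_mem_index] at hidx
      obtain ⟨hx0, hxn, -, h2, -⟩ := hidx
      refine ⟨⟨hx0, by simpa using hxn⟩, ?_⟩
      rw [Bool.and_eq_true, bne_iff_ne]
      exact ⟨hne, (pv_match_any_iff _ _).mpr ⟨key, hk, v, h1, h2, hv⟩⟩
  · exact (PySem.List.pairwise_lt_pyRange_one 0 _).filter _

-- ===== VERDICT (by name: the statement is the Claim_ definition above) =====
theorem build_match_graph_spec : Claim_equal_build_match_graph := by
  intro records _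
  unfold Spec_build_match_graph
  rw [pvA_eq_canon, pvB_eq_canon]
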